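-- pv_equiv track=rewrite | github.com/mcp117/bravus-bot | bravus_bot.py | barras_desde_false
-- ===== SOURCE A (Python) =====
-- def barras_desde_false(lista_booleana):
--     contador = 0
--     for valor in reversed(lista_booleana):
--         if valor:
--             contador += 1
--         else:
--             break
--     return contador
-- ===== SOURCE B (Python) =====
-- def barras_desde_false(lista_booleana):
--     contador = 0
--     for i in range(len(lista_booleana)):
--         if lista_booleana[i]:
--             contador += 1
--         else:
--             contador = 0
--     return contador
-- ===== Notes on version B (the rewrite author's own statement) =====
-- stated objective: alternative
-- what changed: Replaces the reversed-iteration with early break by a single forward pass that increments a counter on True and resets it on False; the final counter equals the length of the trailing run of Trues.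
import Mathlib
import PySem

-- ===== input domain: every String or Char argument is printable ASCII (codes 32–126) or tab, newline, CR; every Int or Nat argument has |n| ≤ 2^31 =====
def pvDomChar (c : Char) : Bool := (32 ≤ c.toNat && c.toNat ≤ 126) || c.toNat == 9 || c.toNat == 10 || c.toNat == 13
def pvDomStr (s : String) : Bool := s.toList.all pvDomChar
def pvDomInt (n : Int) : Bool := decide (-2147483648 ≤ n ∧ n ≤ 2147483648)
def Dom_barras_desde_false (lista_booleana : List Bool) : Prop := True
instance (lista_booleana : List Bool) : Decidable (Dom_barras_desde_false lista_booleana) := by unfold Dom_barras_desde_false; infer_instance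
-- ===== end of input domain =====

-- B replaces A's reversed-iteration-with-break by a forward pass whose counter resets on False (same value; objective: alternative).

-- ===== PORT A =====
-- A's loop over reversed(lista) with break: structural recursion over lista.reverse carrying contador.
def barrasLoopA (contador : Int) : List Bool → Int
  | [] => contador
  | v :: rest => if v then barrasLoopA (contador + 1) rest else contador

def barras_desde_false (lista_booleana : List Bool) : Int :=
  barrasLoopA 0 lista_booleana.reverse

-- ===== PORT B =====
-- B's forward pass: increment on True, reset to 0 on False.
def barras_desde_false_alt (lista_booleana : List Bool) : Int :=
  lista_booleana.foldl (fun contador v => if v then contador + 1 else 0) 0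

-- ===== PRECONDITION & SPEC =====
def Spec_barras_desde_false (lista_booleana : List Bool) (out : Int) : Prop := out = barras_desde_false_alt lista_booleana
instance (lista_booleana : List Bool) (out : Int) : Decidable (Spec_barras_desde_false lista_booleana out) := by unfold Spec_barras_desde_false; infer_instance

-- ===== CLAIM (what is proved, stated in full; the proofs are below) =====
def Claim_equal_barras_desde_false : Prop := ∀ (lista_booleana : List Bool), Dom_barras_desde_false lista_booleana → Spec_barras_desde_false lista_booleana (barras_desde_false lista_booleana)

-- ===== LEMMAS AND PROOFS =====

-- A's loop counts the leading Trues of its (reversed) argument, offset by the accumulator.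
theorem barrasLoopA_acc (l : List Bool) (c : Int) : barrasLoopA c l = c + barrasLoopA 0 l := by
  induction l generalizing c with
  | nil => simp [barrasLoopA]
  | cons v rest ih =>
    simp only [barrasLoopA]
    by_cases hv : v
    · simp [hv, ih (c + 1), ih 1]; ring
    · simp [hv]

theorem foldl_eq_loopA (l : List Bool) :
    l.foldl (fun contador v => if v then contador + 1 else 0) 0 = barrasLoopA 0 l.reverse := by
  induction l using List.reverseRecOn with
  | nil => simp [barrasLoopA]
  | append_singleton l' x ih =>
    rw [List.foldl_append, List.reverse_append]
    simp only [List.foldl, List.reverse_singleton, List.singleton_append, barrasLoopA]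
    by_cases hx : x
    · simp [hx, ih, barrasLoopA_acc l'.reverse 1]; ring
    · simp [hx]

-- ===== VERDICT (by name: the statement is the Claim_ definition above) =====
theorem barras_desde_false_spec : Claim_equal_barras_desde_false := by
  intro l _
  unfold Spec_barras_desde_false barras_desde_false barras_desde_false_alt
  exact (foldl_eq_loopA l).symm
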